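-- pv_equiv track=rewrite | github.com/Golden-Ducks/tp1-task-ARDAYMENE | TP1/TP0 +TP01.py | normaliser
-- ===== SOURCE A (Python) =====
-- def normaliser(texte):
--     nembres = {'0':'zero','1':'one','2':'two','3':'three','4':'four',
--            '5':'five','6':'six','7':'seven','8':'eight','9':'nine'}
--
--
--     new = ""
--     for ch in texte:
--         if ch.isdigit():
--             new += " " + nembres[ch] + " "
--         elif ch.isalpha() :
--             new += ch.lower()
--         elif ch == " ":
--             new += ch.lower()
--
--     new=new .split()
--     new=" ".join(new )
--     return new
-- ===== SOURCE B (Python) =====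
-- def normaliser(texte):
--     nembres = {'0':'zero','1':'one','2':'two','3':'three','4':'four',
--            '5':'five','6':'six','7':'seven','8':'eight','9':'nine'}
--     tokens = []
--     buf = ""
--     for ch in texte:
--         if ch.isalpha():
--             buf += ch.lower()
--         elif ch.isdigit():
--             if buf:
--                 tokens.append(buf)
--                 buf = ""
--             tokens.append(nembres[ch])
--         elif ch == " ":
--             if buf:
--                 tokens.append(buf)
--                 buf = ""
--     if buf:
--         tokens.append(buf)
--     return " ".join(tokens)
-- ===== Notes on version B (the rewrite author's own statement) =====
-- stated objective: alternative
-- what changed: B builds the final token list directly in one pass with a word buffer (flush on space, digits emitted as their own token) instead of A's build-a-padded-string-then-split()-then-join pipeline.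
import Mathlib
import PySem

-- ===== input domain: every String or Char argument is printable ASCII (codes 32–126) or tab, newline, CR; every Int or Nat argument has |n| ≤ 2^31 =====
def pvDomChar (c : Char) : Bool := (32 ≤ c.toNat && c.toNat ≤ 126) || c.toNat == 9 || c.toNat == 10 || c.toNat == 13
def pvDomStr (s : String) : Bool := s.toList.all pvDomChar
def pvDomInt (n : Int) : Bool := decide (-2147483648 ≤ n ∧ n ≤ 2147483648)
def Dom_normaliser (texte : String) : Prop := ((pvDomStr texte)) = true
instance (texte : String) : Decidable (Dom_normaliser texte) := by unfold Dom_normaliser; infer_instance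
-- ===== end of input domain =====

-- B replaces A's padded-string + split() + join pipeline by a single pass that builds the
-- token list directly with a word buffer (objective: alternative decomposition, same cost).

-- the digit→word table both Pythons define literally (values as char lists)
def pvNembres : PySem.Dict Char (List Char) := PySem.Dict.mk
  [('0', ['z','e','r','o']), ('1', ['o','n','e']), ('2', ['t','w','o']),
   ('3', ['t','h','r','e','e']), ('4', ['f','o','u','r']), ('5', ['f','i','v','e']),
   ('6', ['s','i','x']), ('7', ['s','e','v','e','n']), ('8', ['e','i','g','h','t']),
   ('9', ['n','i','n','e'])]

-- ===== PORT A =====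
-- loop body of A ('new += …' in each branch; nembres[ch] is total here: under Dom,
-- isdigit holds exactly on '0'..'9', all keys of the dict, so the KeyError branch is dead)
def pvStepA (new : List Char) (ch : Char) : List Char :=
  if PySem.Chars.isdigit ch then
    new ++ [' '] ++ ((PySem.Dict.get? pvNembres ch).getD []) ++ [' ']
  else if PySem.Chars.isalpha ch then
    new ++ [PySem.Chars.lowerChar ch]
  else if ch = ' ' then
    new ++ [PySem.Chars.lowerChar ch]
  else new

def normaliser (texte : String) : String :=
  let new : List Char := texte.toList.foldl pvStepA []
  String.ofList (PySem.Chars.join [' '] (PySem.Chars.split₀ new))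

-- ===== PORT B =====
-- loop body of B: state = (completed tokens, current word buffer)
def pvStepB (st : List (List Char) × List Char) (ch : Char) : List (List Char) × List Char :=
  if PySem.Chars.isalpha ch then
    (st.1, st.2 ++ [PySem.Chars.lowerChar ch])
  else if PySem.Chars.isdigit ch then
    ((if st.2.isEmpty then st.1 else st.1 ++ [st.2]) ++ [(PySem.Dict.get? pvNembres ch).getD []], [])
  else if ch = ' ' then
    (if st.2.isEmpty then st.1 else st.1 ++ [st.2], [])
  else st

def normaliser_alt (texte : String) : String :=
  let st := texte.toList.foldl pvStepB ([], [])
  let toks := if st.2.isEmpty then st.1 else st.1 ++ [st.2]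
  String.ofList (PySem.Chars.join [' '] toks)

-- ===== PRECONDITION & SPEC =====
def Spec_normaliser (texte : String) (out : String) : Prop := out = normaliser_alt texte
instance (texte : String) (out : String) : Decidable (Spec_normaliser texte out) := by unfold Spec_normaliser; infer_instance

-- ===== CLAIM (what is proved, stated in full; the proofs are below) =====
def Claim_equal_normaliser : Prop := ∀ (texte : String), Dom_normaliser texte → Spec_normaliser texte (normaliser texte)

-- ===== LEMMAS AND PROOFS =====

-- what A's loop appends for one character
def pvEmit (ch : Char) : List Char :=
  if PySem.Chars.isdigit ch then
    [' '] ++ ((PySem.Dict.get? pvNembres ch).getD []) ++ [' ']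
  else if PySem.Chars.isalpha ch then
    [PySem.Chars.lowerChar ch]
  else if ch = ' ' then
    [PySem.Chars.lowerChar ch]
  else []

-- B's final flush
def pvFinish (st : List (List Char) × List Char) : List (List Char) :=
  if st.2.isEmpty then st.1 else st.1 ++ [st.2]

lemma pvStepA_eq (new : List Char) (ch : Char) : pvStepA new ch = new ++ pvEmit ch := by
  unfold pvStepA pvEmit
  split_ifs <;> simp

lemma pvFoldA_eq : ∀ (cs : List Char) (acc : List Char),
    cs.foldl pvStepA acc = acc ++ cs.flatMap pvEmit := by
  intro cs
  induction cs with
  | nil => simp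
  | cons c cs ih => intro acc; simp [List.foldl_cons, pvStepA_eq, ih, List.flatMap_cons]

-- the three step shapes of split₀.go
lemma pv_go_nil (cur : List Char) (acc : List (List Char)) :
    PySem.Chars.split₀.go [] cur acc =
      if cur.isEmpty then acc.reverse else (cur.reverse :: acc).reverse := by
  rw [PySem.Chars.split₀.go]

lemma pv_go_space {c : Char} (h : PySem.Chars.isspace c = true) (rest cur : List Char)
    (acc : List (List Char)) :
    PySem.Chars.split₀.go (c :: rest) cur acc =
      if cur.isEmpty then PySem.Chars.split₀.go rest [] acc
      else PySem.Chars.split₀.go rest [] (cur.reverse :: acc) := by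
  rw [PySem.Chars.split₀.go, if_pos h]

lemma pv_go_notspace {c : Char} (h : PySem.Chars.isspace c = false) (rest cur : List Char)
    (acc : List (List Char)) :
    PySem.Chars.split₀.go (c :: rest) cur acc = PySem.Chars.split₀.go rest (c :: cur) acc := by
  rw [PySem.Chars.split₀.go]
  simp [h]

lemma pv_isdigit_not_isalpha {c : Char} (h : PySem.Chars.isdigit c = true) :
    PySem.Chars.isalpha c = false := by
  simp [PySem.Chars.isdigit, Char.le_def, UInt32.le_iff_toNat_le] at h
  simp [PySem.Chars.isalpha, PySem.Chars.isupper, PySem.Chars.islower, Char.le_def,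
    UInt32.le_iff_toNat_le]
  omega

lemma pv_lower_not_space {c : Char} (h : PySem.Chars.isalpha c = true) :
    PySem.Chars.isspace (PySem.Chars.lowerChar c) = false := by
  simp [PySem.Chars.isalpha, PySem.Chars.isupper, PySem.Chars.islower, Char.le_def,
    UInt32.le_iff_toNat_le] at h
  unfold PySem.Chars.lowerChar
  by_cases hu : PySem.Chars.isupper c = true
  · rw [if_pos hu]
    simp [PySem.Chars.isupper, Char.le_def, UInt32.le_iff_toNat_le] at hu
    have hv : Nat.isValidChar (c.toNat + 32) := by left; omega
    have ht : (Char.ofNat (c.toNat + 32)).toNat = c.toNat + 32 := by simp [Char.ofNat, hv]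
    simp [PySem.Chars.isspace, ht]
    omega
  · rw [if_neg hu]
    simp [PySem.Chars.isupper, Char.le_def, UInt32.le_iff_toNat_le] at hu
    simp [PySem.Chars.isspace]
    omega

-- consuming a run of non-space characters just extends split₀.go's current word
lemma pv_go_nonspace : ∀ (w : List Char), (∀ c ∈ w, PySem.Chars.isspace c = false) →
    ∀ (rest cur : List Char) (acc : List (List Char)),
    PySem.Chars.split₀.go (w ++ rest) cur acc =
      PySem.Chars.split₀.go rest (w.reverse ++ cur) acc := by
  intro w
  induction w with
  | nil => intro _ rest cur acc; simp
  | cons c w ih =>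
    intro h rest cur acc
    rw [List.cons_append, pv_go_notspace (h c (by simp)), ih (fun d hd => h d (by simp [hd]))]
    simp

lemma pv_digit_cases {c : Char} (h : PySem.Chars.isdigit c = true) :
    c = '0' ∨ c = '1' ∨ c = '2' ∨ c = '3' ∨ c = '4' ∨
    c = '5' ∨ c = '6' ∨ c = '7' ∨ c = '8' ∨ c = '9' := by
  simp [PySem.Chars.isdigit, Char.le_def, UInt32.le_iff_toNat_le] at h
  have hc : Char.ofNat c.toNat = c := Char.ofNat_toNat c
  have hn : c.toNat = 48 ∨ c.toNat = 49 ∨ c.toNat = 50 ∨ c.toNat = 51 ∨ c.toNat = 52 ∨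
      c.toNat = 53 ∨ c.toNat = 54 ∨ c.toNat = 55 ∨ c.toNat = 56 ∨ c.toNat = 57 := by omega
  rcases hn with h' | h' | h' | h' | h' | h' | h' | h' | h' | h' <;> rw [← hc, h'] <;> decide

-- the digit's word is a nonempty run of non-space characters
lemma pv_word_props {c : Char} (h : PySem.Chars.isdigit c = true) :
    ((PySem.Dict.get? pvNembres c).getD [] ≠ [] ∧
      ∀ d ∈ (PySem.Dict.get? pvNembres c).getD [], PySem.Chars.isspace d = false) := by
  rcases pv_digit_cases h with h' | h' | h' | h' | h' | h' | h' | h' | h' | h' <;>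
    subst h' <;> exact ⟨by decide, by intro d hd; fin_cases hd <;> decide⟩

-- main invariant: split₀.go on A's remaining emitted text, started from B's current
-- state (buffer and tokens reversed), computes B's final token list
lemma pv_main : ∀ (cs : List Char) (toks : List (List Char)) (buf : List Char),
    PySem.Chars.split₀.go (cs.flatMap pvEmit) buf.reverse toks.reverse =
      pvFinish (cs.foldl pvStepB (toks, buf)) := by
  intro cs
  induction cs with
  | nil =>
    intro toks buf
    simp only [List.flatMap_nil, List.foldl_nil]
    rw [pv_go_nil]
    cases buf <;> simp [pvFinish]
  | cons ch cs ih =>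
    intro toks buf
    rw [List.flatMap_cons, List.foldl_cons]
    by_cases hd : PySem.Chars.isdigit ch = true
    · -- digit: A emits ' ' ++ word ++ ' '; B flushes the buffer and appends the word
      have hα := pv_isdigit_not_isalpha hd
      obtain ⟨hw, hns⟩ := pv_word_props hd
      set w := (PySem.Dict.get? pvNembres ch).getD [] with hwdef
      have e1 : (pvEmit ch ++ cs.flatMap pvEmit) = ' ' :: (w ++ (' ' :: cs.flatMap pvEmit)) := by
        rw [pvEmit, if_pos hd]; simp [hwdef]
      rw [e1, pv_go_space (by decide)]
      have e2 : (if buf.reverse.isEmpty then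
            PySem.Chars.split₀.go (w ++ (' ' :: cs.flatMap pvEmit)) [] toks.reverse
          else PySem.Chars.split₀.go (w ++ (' ' :: cs.flatMap pvEmit)) []
            (buf.reverse.reverse :: toks.reverse)) =
          PySem.Chars.split₀.go (w ++ (' ' :: cs.flatMap pvEmit)) []
            (pvFinish (toks, buf)).reverse := by
        cases buf <;> simp [pvFinish]
      rw [e2, pv_go_nonspace w hns, List.append_nil, pv_go_space (by decide),
        if_neg (by simp [hw])]
      have e3 : (w.reverse.reverse :: (pvFinish (toks, buf)).reverse) =
          (pvFinish (toks, buf) ++ [w]).reverse := by simp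
      rw [e3]
      have h4 := ih (pvFinish (toks, buf) ++ [w]) []
      simp only [List.reverse_nil] at h4
      rw [h4, show pvStepB (toks, buf) ch = (pvFinish (toks, buf) ++ [w], []) from by
        rw [pvStepB, if_neg (by simp [hα]), if_pos hd]; simp [pvFinish, ← hwdef]]
    · by_cases hα : PySem.Chars.isalpha ch = true
      · -- letter: both extend the current word
        have e1 : (pvEmit ch ++ cs.flatMap pvEmit) =
            PySem.Chars.lowerChar ch :: cs.flatMap pvEmit := by
          rw [pvEmit, if_neg hd, if_pos hα]; rfl
        rw [e1, pv_go_notspace (pv_lower_not_space hα)]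
        have e2 : (PySem.Chars.lowerChar ch :: buf.reverse) =
            (buf ++ [PySem.Chars.lowerChar ch]).reverse := by simp
        rw [e2, ih toks (buf ++ [PySem.Chars.lowerChar ch]),
          show pvStepB (toks, buf) ch = (toks, buf ++ [PySem.Chars.lowerChar ch]) from by
            rw [pvStepB, if_pos hα]]
      · by_cases hsp : ch = ' '
        · -- space: both flush the buffer
          subst hsp
          have e1 : (pvEmit ' ' ++ cs.flatMap pvEmit) = ' ' :: cs.flatMap pvEmit := by
            rw [pvEmit, if_neg hd, if_neg hα, if_pos rfl]
            rw [show PySem.Chars.lowerChar ' ' = ' ' from by decide]; rfl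
          rw [e1, pv_go_space (by decide)]
          have e2 : (if buf.reverse.isEmpty then
                PySem.Chars.split₀.go (cs.flatMap pvEmit) [] toks.reverse
              else PySem.Chars.split₀.go (cs.flatMap pvEmit) []
                (buf.reverse.reverse :: toks.reverse)) =
              PySem.Chars.split₀.go (cs.flatMap pvEmit) [] (pvFinish (toks, buf)).reverse := by
            cases buf <;> simp [pvFinish]
          rw [e2]
          have h4 := ih (pvFinish (toks, buf)) []
          simp only [List.reverse_nil] at h4
          rw [h4, show pvStepB (toks, buf) ' ' = (pvFinish (toks, buf), []) from by
            rw [pvStepB, if_neg (by simp [hα]), if_neg (by simp [hd]), if_pos rfl, pvFinish]]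
        · -- any other character: both ignore it
          have e1 : (pvEmit ch ++ cs.flatMap pvEmit) = cs.flatMap pvEmit := by
            rw [pvEmit, if_neg hd, if_neg hα, if_neg hsp]; rfl
          rw [e1, ih toks buf,
            show pvStepB (toks, buf) ch = (toks, buf) from by
              rw [pvStepB, if_neg (by simp [hα]), if_neg (by simp [hd]), if_neg hsp]]

-- ===== VERDICT (by name: the statement is the Claim_ definition above) =====
theorem normaliser_spec : Claim_equal_normaliser := by
  intro texte _
  unfold Spec_normaliser
  simp only [normaliser, normaliser_alt]
  rw [pvFoldA_eq, List.nil_append]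
  have h := pv_main texte.toList [] []
  simp only [List.reverse_nil] at h
  rw [PySem.Chars.split₀, h]
  simp [pvFinish]
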